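-- pv_equiv track=rewrite | github.com/marcndo/algo_ds_playground | problems/search/index_mountain_array.py | find_pick_index
-- ===== SOURCE A (Python) =====
-- def find_pick_index(arr):
--     peak_index = {}
--     length = len(arr)
--     for i in range(length):
--         for j in range(i+1, length):
--             if arr[i] > arr[j]:
--                 peak_index[arr[i]] = i
--                 break
--
--     return max(peak_index.items())[1]
-- ===== SOURCE B (Python) =====
-- def find_pick_index(arr):
--     # O(n): suffix minimum decides "a smaller element exists later" in O(1) per index;
--     # one forward pass keeps the best (value, index), preferring later indices on equal value.
--     n = len(arr)
--     suffmin = [None] * n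
--     m = None
--     for j in range(n - 1, -1, -1):
--         suffmin[j] = m
--         if m is None or arr[j] < m:
--             m = arr[j]
--     best = None
--     for i in range(n):
--         sm = suffmin[i]
--         if sm is not None and arr[i] > sm:
--             if best is None or arr[i] >= best[0]:
--                 best = (arr[i], i)
--     return best[1]
-- ===== Notes on version B (the rewrite author's own statement) =====
-- stated objective: faster
-- what changed: Replaces the quadratic nested scan (for each i, scan all later j for a smaller element) and the final max over a dict by a suffix-minimum array computed in one backward pass plus one forward pass tracking the best (value, index) pair.
import Mathlib
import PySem

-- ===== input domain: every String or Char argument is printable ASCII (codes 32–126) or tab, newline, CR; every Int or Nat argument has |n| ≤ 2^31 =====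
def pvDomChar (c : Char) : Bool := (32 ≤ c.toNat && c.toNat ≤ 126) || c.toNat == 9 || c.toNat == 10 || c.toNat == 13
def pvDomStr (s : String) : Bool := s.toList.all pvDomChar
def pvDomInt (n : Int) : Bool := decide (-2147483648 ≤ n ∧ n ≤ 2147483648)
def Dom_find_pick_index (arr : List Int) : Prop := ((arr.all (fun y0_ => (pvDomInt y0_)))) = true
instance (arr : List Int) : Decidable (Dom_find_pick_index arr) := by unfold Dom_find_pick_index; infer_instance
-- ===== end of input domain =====

-- B replaces A's quadratic nested scan + dict-max by a suffix-minimum array and one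
-- forward pass keeping the best (value, index) pair (asymptotically faster, O(n) vs O(n^2)).


-- ===== PORT A =====
-- inner 'for j in range(i+1, length): if arr[i] > arr[j]: peak_index[arr[i]] = i; break'
def pvInnerA (arr : List Int) (x i : Int) (d : PySem.Dict Int Int) : List Int → PySem.Dict Int Int
  | [] => d
  | j :: js => if PySem.List.pyGetD arr j 0 < x then d.insert x i else pvInnerA arr x i d js

def find_pick_index (arr : List Int) : Int :=
  -- length = len(arr); peak_index = the dict built by the nested loops;
  -- max(peak_index.items())[1] is Python's lexicographic max over (key, value) pairs
  match PySem.List.max2?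
      ((PySem.List.pyRange 0 (arr.length : Int)).foldl
        (fun d i => pvInnerA arr (PySem.List.pyGetD arr i 0) i d
          (PySem.List.pyRange (i + 1) (arr.length : Int)))
        PySem.Dict.empty).items Prod.fst Prod.snd with
  | some p => p.2
  | none => 0   -- Python raises ValueError here (empty dict); excluded by Pre_

-- ===== PORT B =====
-- backward loop: suffmin[j] = min of arr[j+1:] (none for the last); second component = running min
def pvSuffminsB : List Int → List (Option Int) × Option Int
  | [] => ([], none)
  | x :: xs =>
    let r := pvSuffminsB xs
    (r.2 :: r.1, some (match r.2 with | none => x | some v => if x < v then x else v))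

-- forward loop over (arr[i], suffmin[i]) keeping best = (value, index), i the running index
def pvBestB : List (Int × Option Int) → Option (Int × Int) → Int → Option (Int × Int)
  | [], b, _ => b
  | p :: t, b, i =>
      pvBestB t
        (match p.2 with
         | none => b
         | some sm =>
           if sm < p.1 then
             match b with
             | none => some (p.1, i)
             | some bv => if bv.1 ≤ p.1 then some (p.1, i) else b
           else b)
        (i + 1)

def find_pick_index_alt (arr : List Int) : Int :=
  match pvBestB (arr.zip (pvSuffminsB arr).1) none 0 with
  | some bv => bv.2
  | none => 0   -- Python raises TypeError here (best is None); excluded by Pre_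

-- ===== PRECONDITION & SPEC =====
-- Pre_ excludes exactly the inputs with no strict descent (empty or non-decreasing lists),
-- on which A raises ValueError (max of an empty dict) and B raises TypeError.
def Pre_find_pick_index (arr : List Int) : Prop :=
  (arr.zip arr.tail).any (fun p => decide (p.2 < p.1)) = true
instance (arr : List Int) : Decidable (Pre_find_pick_index arr) := by
  unfold Pre_find_pick_index; infer_instance

def pvWitness_find_pick_index : List Int := [2, 1]

def Spec_find_pick_index (arr : List Int) (out : Int) : Prop := out = find_pick_index_alt arr
instance (arr : List Int) (out : Int) : Decidable (Spec_find_pick_index arr out) := by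
  unfold Spec_find_pick_index; infer_instance

-- ===== CLAIM (what is proved, stated in full; the proofs are below) =====
def Claim_equal_find_pick_index : Prop := ∀ (arr : List Int), Dom_find_pick_index arr → Pre_find_pick_index arr → Spec_find_pick_index arr (find_pick_index arr)

-- ===== LEMMAS AND PROOFS =====

-- reference forms of the two loops, recursing on the list with the running index
def pvRefA : List Int → PySem.Dict Int Int → Int → PySem.Dict Int Int
  | [], d, _ => d
  | x :: t, d, i => pvRefA t (if t.any (fun y => decide (y < x)) then d.insert x i else d) (i + 1)

def pvUpd (b : Option (Int × Int)) (x i : Int) : Option (Int × Int) :=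
  match b with
  | none => some (x, i)
  | some bv => if bv.1 ≤ x then some (x, i) else b

def pvRefB : List Int → Option (Int × Int) → Int → Option (Int × Int)
  | [], b, _ => b
  | x :: t, b, i =>
      pvRefB t (if t.any (fun y => decide (y < x)) then pvUpd b x i else b) (i + 1)

theorem pvInnerA_eq (arr : List Int) (x i : Int) (d : PySem.Dict Int Int) (js : List Int) :
    pvInnerA arr x i d js =
      if js.any (fun j => decide (PySem.List.pyGetD arr j 0 < x)) then d.insert x i else d := by
  induction js with
  | nil => simp [pvInnerA]
  | cons j js ih =>
    simp only [pvInnerA, List.any_cons, ih]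
    by_cases h : PySem.List.pyGetD arr j 0 < x <;> simp [h]

theorem pvRangeAny_eq (arr : List Int) (x : Int) :
    ∀ (n k : Nat), arr.length - k ≤ n →
      ((PySem.List.pyRange (k : Int) (arr.length : Int)).any
        (fun j => decide (PySem.List.pyGetD arr j 0 < x)))
      = (arr.drop k).any (fun y => decide (y < x)) := by
  intro n
  induction n with
  | zero =>
    intro k hk
    have hk' : arr.length ≤ k := by omega
    rw [PySem.List.pyRange_one_eq_nil (by exact_mod_cast hk'), List.drop_eq_nil_of_le hk']
    simp
  | succ n ih =>
    intro k hk
    by_cases h : k < arr.length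
    · rw [PySem.List.pyRange_one_cons (by exact_mod_cast h)]
      have hcast : ((k : Int) + 1) = ((k + 1 : Nat) : Int) := by push_cast; ring
      rw [List.drop_eq_getElem_cons h, List.any_cons, List.any_cons, hcast,
        ih (k + 1) (by omega)]
      congr 1
      rw [PySem.List.pyGetD_natCast, List.getD_eq_getElem _ _ h]
    · have hk' : arr.length ≤ k := by omega
      rw [PySem.List.pyRange_one_eq_nil (by exact_mod_cast hk'), List.drop_eq_nil_of_le hk']
      simp

theorem pvFoldA_eq (arr : List Int) :
    ∀ (n k : Nat) (d : PySem.Dict Int Int), arr.length - k ≤ n →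
      ((PySem.List.pyRange (k : Int) (arr.length : Int)).foldl
        (fun d i => pvInnerA arr (PySem.List.pyGetD arr i 0) i d
          (PySem.List.pyRange (i + 1) (arr.length : Int))) d)
      = pvRefA (arr.drop k) d (k : Int) := by
  intro n
  induction n with
  | zero =>
    intro k d hk
    have hk' : arr.length ≤ k := by omega
    rw [PySem.List.pyRange_one_eq_nil (by exact_mod_cast hk'), List.drop_eq_nil_of_le hk']
    rfl
  | succ n ih =>
    intro k d hk
    by_cases h : k < arr.length
    · rw [PySem.List.pyRange_one_cons (by exact_mod_cast h), List.drop_eq_getElem_cons h]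
      rw [List.foldl_cons]
      have hcast : ((k : Int) + 1) = ((k + 1 : Nat) : Int) := by push_cast; ring
      rw [hcast, ih (k + 1) _ (by omega), pvRefA, ← hcast]
      congr 1
      rw [pvInnerA_eq, hcast, pvRangeAny_eq arr _ (arr.length) (k+1) (by omega)]
      rw [PySem.List.pyGetD_natCast, List.getD_eq_getElem _ _ h]
    · have hk' : arr.length ≤ k := by omega
      rw [PySem.List.pyRange_one_eq_nil (by exact_mod_cast hk'), List.drop_eq_nil_of_le hk']
      rfl

theorem pvSuffmin_test (x : Int) :
    ∀ (xs : List Int),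
      (match (pvSuffminsB xs).2 with | none => false | some sm => decide (sm < x))
        = xs.any (fun y => decide (y < x)) := by
  intro xs
  induction xs with
  | nil => simp [pvSuffminsB]
  | cons y t ih =>
    simp only [pvSuffminsB, List.any_cons]
    rw [← ih]
    cases h : (pvSuffminsB t).2 with
    | none => simp
    | some v =>
      simp only []
      by_cases h1 : y < v <;> by_cases h2 : y < x <;> by_cases h3 : v < x <;>
        simp [h1, h2, h3] <;> omega

theorem pvBestB_eq :
    ∀ (xs : List Int) (b : Option (Int × Int)) (i : Int),
      pvBestB (xs.zip (pvSuffminsB xs).1) b i = pvRefB xs b i := by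
  intro xs
  induction xs with
  | nil => intro b i; rfl
  | cons x t ih =>
    intro b i
    have hz : (pvSuffminsB (x :: t)).1 = (pvSuffminsB t).2 :: (pvSuffminsB t).1 := rfl
    rw [hz, List.zip_cons_cons]
    simp only [pvBestB, pvRefB]
    rw [ih]
    congr 1
    rw [← pvSuffmin_test x t]
    cases h : (pvSuffminsB t).2 with
    | none => simp
    | some sm =>
      by_cases hlt : sm < x <;> simp [hlt, pvUpd]

-- the invariant tying the dict to the running best pair
def pvInv (d : PySem.Dict Int Int) (b : Option (Int × Int)) : Prop :=
  d.keys.Nodup ∧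
    ((b = none ∧ d.items = []) ∨
      ∃ v i, b = some (v, i) ∧ d.get? v = some i ∧ ∀ p ∈ d.items, p.1 ≤ v)

theorem pvInv_step (d : PySem.Dict Int Int) (b : Option (Int × Int)) (c : Bool) (x i : Int)
    (h : pvInv d b) :
    pvInv (if c then d.insert x i else d) (if c then pvUpd b x i else b) := by
  cases c with
  | false => simpa using h
  | true =>
    simp only [if_true, pvUpd]
    obtain ⟨hnd, hrest⟩ := h
    refine ⟨PySem.Dict.nodup_keys_insert d x i hnd, ?_⟩
    rcases hrest with ⟨hb, hit⟩ | ⟨v, j, hb, hget, hle⟩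
    · subst hb
      refine Or.inr ⟨x, i, rfl, PySem.Dict.get?_insert_self d x i, ?_⟩
      intro p hp
      rcases (PySem.Dict.mem_items_insert d x i p).1 hp with h1 | ⟨h1, _⟩
      · subst h1; exact le_refl _
      · rw [hit] at h1; cases h1
    · subst hb
      by_cases hvx : v ≤ x
      · simp only [hvx, if_true]
        refine Or.inr ⟨x, i, rfl, PySem.Dict.get?_insert_self d x i, ?_⟩
        intro p hp
        rcases (PySem.Dict.mem_items_insert d x i p).1 hp with h1 | ⟨h1, _⟩
        · subst h1; exact le_refl _
        · exact le_trans (hle p h1) hvx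
      · simp only [hvx, if_false]
        refine Or.inr ⟨v, j, rfl, ?_, ?_⟩
        · rw [PySem.Dict.get?_insert, if_neg (by omega)]
          exact hget
        · intro p hp
          rcases (PySem.Dict.mem_items_insert d x i p).1 hp with h1 | ⟨h1, _⟩
          · subst h1; omega
          · exact hle p h1

theorem pvInv_fold :
    ∀ (t : List Int) (d : PySem.Dict Int Int) (b : Option (Int × Int)) (i : Int),
      pvInv d b → pvInv (pvRefA t d i) (pvRefB t b i) := by
  intro t
  induction t with
  | nil => intro d b i h; exact h
  | cons x t ih =>
    intro d b i h
    exact ih _ _ _ (pvInv_step d b (t.any (fun y => decide (y < x))) x i h)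

theorem pvRefB_isSome :
    ∀ (t : List Int) (b : Option (Int × Int)) (i : Int), b.isSome → (pvRefB t b i).isSome := by
  intro t
  induction t with
  | nil => intro b i h; exact h
  | cons x t ih =>
    intro b i h
    apply ih
    cases hb : b with
    | none => rw [hb] at h; cases h
    | some bv =>
      cases hc : t.any (fun y => decide (y < x)) <;> simp [pvUpd]
      by_cases h1 : bv.1 ≤ x <;> simp [h1]

theorem pvRefB_some_of_descent :
    ∀ (t : List Int) (b : Option (Int × Int)) (i : Int),
      (t.zip t.tail).any (fun p => decide (p.2 < p.1)) = true → (pvRefB t b i).isSome := by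
  intro t
  induction t with
  | nil => intro b i h; cases h
  | cons x t ih =>
    intro b i h
    cases t with
    | nil => cases h
    | cons y t' =>
      by_cases hc : (y :: t').any (fun z => decide (z < x))
      · rw [pvRefB]
        apply pvRefB_isSome
        rw [hc]
        cases b <;> simp [pvUpd]
        split <;> simp
      · have hyx : ¬ y < x := by
          intro hlt
          apply hc
          simp [hlt]
        rw [List.tail_cons, List.zip_cons_cons, List.any_cons] at h
        rcases Bool.or_eq_true_iff.1 h with h1 | h1
        · exact absurd (of_decide_eq_true h1) hyx
        · rw [pvRefB]
          exact ih _ _ h1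

-- max2? over a pair list whose keys are Nodup picks the (unique) pair with the greatest key
def pvMaxStep (acc : Option (Int × Int)) (x : Int × Int) : Option (Int × Int) :=
  match acc with
  | none => some x
  | some m =>
    if (decide (m.1 < x.1) || !decide (x.1 < m.1) && decide (m.2 < x.2)) = true
    then some x else some m

theorem pvMax2_bridge (l : List (Int × Int)) :
    PySem.List.max2? l Prod.fst Prod.snd = l.foldl pvMaxStep none := by
  unfold PySem.List.max2? pvMaxStep
  congr 1
  funext acc x
  cases acc <;> rfl

theorem pvMaxFold_const (v i : Int) :
    ∀ (l : List (Int × Int)), (∀ p ∈ l, p.1 < v) →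
      l.foldl pvMaxStep (some (v, i)) = some (v, i) := by
  intro l
  induction l with
  | nil => intro _; rfl
  | cons p l ih =>
    intro h
    have hp : p.1 < v := h p (List.mem_cons_self)
    rw [List.foldl_cons]
    show List.foldl pvMaxStep
      (if (decide ((v, i).1 < p.1) || !decide (p.1 < (v, i).1) && decide ((v, i).2 < p.2)) = true
        then some p else some (v, i)) l = some (v, i)
    rw [if_neg ?_]
    · exact ih (fun q hq => h q (List.mem_cons_of_mem p hq))
    · intro hcond
      simp only [Bool.or_eq_true, Bool.and_eq_true, Bool.not_eq_true',
        decide_eq_true_eq, decide_eq_false_iff_not] at hcond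
      omega

theorem pvMax2_eq (v i : Int) :
    ∀ (l : List (Int × Int)) (acc : Option (Int × Int)),
      (v, i) ∈ l → (∀ p ∈ l, p.1 ≤ v) → (l.map Prod.fst).Nodup →
      (acc = none ∨ ∃ a, acc = some a ∧ a.1 < v) →
      l.foldl pvMaxStep acc = some (v, i) := by
  intro l
  induction l with
  | nil => intro acc h; cases h
  | cons p l ih =>
    intro acc hmem hle hnd hacc
    rw [List.map_cons, List.nodup_cons] at hnd
    rw [List.foldl_cons]
    rcases List.mem_cons.1 hmem with hp | hp
    · subst hp
      have hlt : ∀ q ∈ l, q.1 < v := by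
        intro q hq
        have h1 : q.1 ≤ v := hle q (List.mem_cons_of_mem _ hq)
        have h2 : q.1 ≠ v := by
          intro he
          have hm : q.1 ∈ l.map Prod.fst := List.mem_map_of_mem hq
          rw [he] at hm
          exact hnd.1 hm
        omega
      rcases hacc with hacc | ⟨a, hacc, halt⟩
      · subst hacc
        exact pvMaxFold_const v i l hlt
      · subst hacc
        simp only [pvMaxStep, decide_eq_true halt, Bool.true_or, if_true]
        exact pvMaxFold_const v i l hlt
    · have hp1 : p.1 < v := by
        have h1 : p.1 ≤ v := hle p (List.mem_cons_self)
        have h2 : p.1 ≠ v := by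
          intro he
          have hm : v ∈ l.map Prod.fst := List.mem_map_of_mem (f := Prod.fst) hp
          apply hnd.1
          rw [he]
          exact hm
        omega
      apply ih _ hp (fun q hq => hle q (List.mem_cons_of_mem _ hq)) hnd.2
      rcases hacc with hacc | ⟨a, hacc, halt⟩
      · subst hacc; exact Or.inr ⟨p, rfl, hp1⟩
      · subst hacc
        right
        by_cases hc : (decide (a.1 < p.1) || !decide (p.1 < a.1) && decide (a.2 < p.2)) = true
        · simp only [pvMaxStep, hc, if_true]; exact ⟨p, rfl, hp1⟩
        · simp only [pvMaxStep, hc]; exact ⟨a, rfl, halt⟩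

-- ===== VERDICT (by name: the statement is the Claim_ definition above) =====
theorem find_pick_index_spec : Claim_equal_find_pick_index := by
  intro arr _ hpre
  unfold Spec_find_pick_index find_pick_index find_pick_index_alt
  have hA := pvFoldA_eq arr arr.length 0 PySem.Dict.empty (by omega)
  simp only [Nat.cast_zero, List.drop_zero] at hA
  rw [hA, pvBestB_eq arr none 0]
  have hinv : pvInv (pvRefA arr PySem.Dict.empty 0) (pvRefB arr none 0) := by
    apply pvInv_fold
    exact ⟨PySem.Dict.nodup_keys_empty, Or.inl ⟨rfl, rfl⟩⟩
  have hsome : (pvRefB arr none 0).isSome := pvRefB_some_of_descent arr none 0 hpre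
  obtain ⟨hnd, hrest⟩ := hinv
  rcases hrest with ⟨hb, _⟩ | ⟨v, j, hb, hget, hle⟩
  · rw [hb] at hsome; cases hsome
  · rw [hb]
    have hmem : (v, j) ∈ (pvRefA arr PySem.Dict.empty 0).items :=
      PySem.Dict.mem_items_of_get?_eq_some _ hget
    have hmax : PySem.List.max2? (pvRefA arr PySem.Dict.empty 0).items Prod.fst Prod.snd
        = some (v, j) := by
      rw [pvMax2_bridge]
      exact pvMax2_eq v j _ none hmem hle hnd (Or.inl rfl)
    rw [hmax]
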